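-- pv_equiv track=rewrite | github.com/collinsakenga/codewars_solutions | 6 kyu/Tick Toward.py | tick_toward
-- ===== SOURCE A (Python) =====
-- def tick_toward(start, target):
--     res=[]
--     h_direction=1 if target[0]>=start[0] else -1
--     v_direction=1 if target[1]>=start[1] else -1
--     times=min(abs(target[0]-start[0]), abs(target[1]-start[1]))
--     for i in range(times+1):
--         res.append((start[0]+i*h_direction, start[1]+i*v_direction))
--     if res[-1][0]==target[0]:
--         for i in range(abs(target[1]-res[-1][1])):
--             res.append((res[-1][0], res[-1][1]+v_direction))
--     elif res[-1][1]==target[1]: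
--         for i in range(abs(target[0]-res[-1][0])):
--             res.append((res[-1][0]+h_direction, res[-1][1]))
--     return res
-- ===== SOURCE B (Python) =====
-- def tick_toward(start, target):
--     dx = target[0] - start[0]
--     dy = target[1] - start[1]
--     h = 1 if dx >= 0 else -1
--     v = 1 if dy >= 0 else -1
--     steps = max(abs(dx), abs(dy))
--     return [(start[0] + h * min(i, abs(dx)), start[1] + v * min(i, abs(dy)))
--             for i in range(steps + 1)]
-- ===== Notes on version B (the rewrite author's own statement) =====
-- stated objective: simpler
-- what changed: Replaces A's three mutating append loops (counted diagonal loop plus two tail loops re-reading res[-1]) by a single closed-form comprehension: point i is (x+h*min(i,|dx|), y+v*min(i,|dy|)) for i in 0..max(|dx|,|dy|).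
import Mathlib
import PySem

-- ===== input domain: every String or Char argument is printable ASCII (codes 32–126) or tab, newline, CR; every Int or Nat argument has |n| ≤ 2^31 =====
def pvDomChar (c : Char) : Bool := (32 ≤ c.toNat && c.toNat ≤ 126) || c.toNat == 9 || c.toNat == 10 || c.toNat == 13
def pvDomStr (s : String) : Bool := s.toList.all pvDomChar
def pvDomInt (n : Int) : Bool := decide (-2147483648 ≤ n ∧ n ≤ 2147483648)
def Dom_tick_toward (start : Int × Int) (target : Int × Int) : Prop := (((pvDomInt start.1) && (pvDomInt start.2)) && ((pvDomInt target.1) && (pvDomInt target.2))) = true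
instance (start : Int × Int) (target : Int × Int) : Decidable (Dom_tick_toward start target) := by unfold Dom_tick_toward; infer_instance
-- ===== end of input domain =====

-- B replaces A's diagonal loop + two tail append loops by one closed-form comprehension (objective: simpler).

-- ===== PORT A =====
-- literal port of A: diagonal loop appending, then res[-1]-driven tail loops.
-- res is never empty (the diagonal loop runs times+1 ≥ 1 iterations), so Python's res[-1]
-- never raises; the `none` match arm and the pyGetD default (0,0) are unreachable.
def tick_toward (start : Int × Int) (target : Int × Int) : List (Int × Int) :=
  let h := if target.1 ≥ start.1 then (1 : Int) else -1
  let v := if target.2 ≥ start.2 then (1 : Int) else -1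
  let times : Int := min ((target.1 - start.1).natAbs : Int) ((target.2 - start.2).natAbs : Int)
  let res := (PySem.List.pyRange 0 (times + 1) 1).foldl
      (fun r i => r ++ [(start.1 + i * h, start.2 + i * v)]) []
  match PySem.List.pyGet? res (-1) with
  | none => []
  | some last =>
    if last.1 = target.1 then
      (PySem.List.pyRange 0 ((target.2 - last.2).natAbs : Int) 1).foldl
        (fun r _ => r ++ [((PySem.List.pyGetD r (-1) ((0:Int),(0:Int))).1,
                           (PySem.List.pyGetD r (-1) ((0:Int),(0:Int))).2 + v)]) res
    else if last.2 = target.2 then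
      (PySem.List.pyRange 0 ((target.1 - last.1).natAbs : Int) 1).foldl
        (fun r _ => r ++ [((PySem.List.pyGetD r (-1) ((0:Int),(0:Int))).1 + h,
                           (PySem.List.pyGetD r (-1) ((0:Int),(0:Int))).2)]) res
    else res

-- ===== PORT B =====
-- literal port of B: one comprehension over range(steps+1) with a per-index closed form.
def tick_toward_alt (start : Int × Int) (target : Int × Int) : List (Int × Int) :=
  let dx := target.1 - start.1
  let dy := target.2 - start.2
  let h := if dx ≥ 0 then (1 : Int) else -1
  let v := if dy ≥ 0 then (1 : Int) else -1
  let steps : Int := max (dx.natAbs : Int) (dy.natAbs : Int)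
  (PySem.List.pyRange 0 (steps + 1) 1).map
    (fun i => (start.1 + h * min i (dx.natAbs : Int), start.2 + v * min i (dy.natAbs : Int)))

-- ===== PRECONDITION & SPEC =====
def Spec_tick_toward (start : Int × Int) (target : Int × Int) (out : List (Int × Int)) : Prop := out = tick_toward_alt start target
instance (start : Int × Int) (target : Int × Int) (out : List (Int × Int)) : Decidable (Spec_tick_toward start target out) := by unfold Spec_tick_toward; infer_instance

-- ===== CLAIM (what is proved, stated in full; the proofs are below) =====
def Claim_equal_tick_toward : Prop := ∀ (start : Int × Int) (target : Int × Int), Dom_tick_toward start target → Spec_tick_toward start target (tick_toward start target)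

-- ===== LEMMAS AND PROOFS =====

lemma iter_v (v : Int) (p : Int × Int) (k : Nat) :
    (fun q : Int × Int => (q.1, q.2 + v))^[k] p = (p.1, p.2 + k * v) := by
  induction k with
  | zero => simp
  | succ n ih => simp [Function.iterate_succ_apply', ih]; ring

lemma iter_h (h : Int) (p : Int × Int) (k : Nat) :
    (fun q : Int × Int => (q.1 + h, q.2))^[k] p = (p.1 + k * h, p.2) := by
  induction k with
  | zero => simp
  | succ n ih => simp [Function.iterate_succ_apply', ih]; ring

lemma pyGetD_append_map_range (g : Nat → Int × Int) (L : List (Int × Int)) (n : Nat) :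
    PySem.List.pyGetD (L ++ (List.range (n+1)).map g) (-1) ((0:Int),(0:Int)) = g n := by
  simp only [List.range_succ, List.map_append, List.map_cons, List.map_nil,
    ← List.append_assoc, PySem.List.pyGetD_neg_one_append_singleton]

lemma tail_fold (d : Int × Int → Int × Int) (n : Nat) (pre : List (Int × Int)) (p : Int × Int) :
    (PySem.List.pyRange 0 (n : Int) 1).foldl
      (fun r _ => r ++ [d (PySem.List.pyGetD r (-1) ((0:Int),(0:Int)))]) (pre ++ [p])
    = pre ++ [p] ++ (List.range n).map (fun k => d^[k+1] p) := by
  induction n with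
  | zero => simp
  | succ m ih =>
    have hc : ((m + 1 : Nat) : Int) = (m : Int) + 1 := by push_cast; ring
    rw [hc, PySem.List.pyRange_one_succ_right (by positivity), List.foldl_append, ih]
    cases m with
    | zero =>
      simp only [List.foldl_cons, List.foldl_nil, List.range_zero, List.map_nil,
        List.append_nil, PySem.List.pyGetD_neg_one_append_singleton]
      simp [List.range_succ]
    | succ j =>
      simp only [List.foldl_cons, List.foldl_nil]
      rw [pyGetD_append_map_range (fun k => d^[k+1] p) (pre ++ [p]) j]
      conv_rhs => rw [List.range_succ]
      simp [Function.iterate_succ_apply', List.append_assoc]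

lemma diag_eq (x0 y0 h v t : Int) (ht : 0 ≤ t) :
    (PySem.List.pyRange 0 (t + 1) 1).foldl (fun r i => r ++ [(x0 + i * h, y0 + i * v)]) []
    = (PySem.List.pyRange 0 t 1).map (fun i => (x0 + i * h, y0 + i * v))
      ++ [(x0 + t * h, y0 + t * v)] := by
  rw [PySem.List.foldl_append_singleton_eq_map, PySem.List.pyRange_one_succ_right ht,
    List.map_append]
  simp

lemma key (x0 y0 tx ty h v : Int)
    (heq : (if tx ≥ x0 then (1 : Int) else -1) = h)
    (veq : (if ty ≥ y0 then (1 : Int) else -1) = v)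
    (heq2 : (if tx - x0 ≥ 0 then (1 : Int) else -1) = h)
    (veq2 : (if ty - y0 ≥ 0 then (1 : Int) else -1) = v) :
    tick_toward (x0, y0) (tx, ty) = tick_toward_alt (x0, y0) (tx, ty) := by
  have hh : h * ((tx - x0).natAbs : Int) = tx - x0 := by
    rcases le_or_gt x0 tx with hx | hx
    · rw [← heq, if_pos (show tx ≥ x0 from hx), one_mul]; omega
    · rw [← heq, if_neg (show ¬ tx ≥ x0 by omega), neg_one_mul]; omega
  have hv : v * ((ty - y0).natAbs : Int) = ty - y0 := by
    rcases le_or_gt y0 ty with hy | hy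
    · rw [← veq, if_pos (show ty ≥ y0 from hy), one_mul]; omega
    · rw [← veq, if_neg (show ¬ ty ≥ y0 by omega), neg_one_mul]; omega
  have hh1 : h = 1 ∨ h = -1 := by
    rcases le_or_gt x0 tx with hx | hx
    · left; rw [← heq, if_pos (show tx ≥ x0 from hx)]
    · right; rw [← heq, if_neg (show ¬ tx ≥ x0 by omega)]
  have hv1 : v = 1 ∨ v = -1 := by
    rcases le_or_gt y0 ty with hy | hy
    · left; rw [← veq, if_pos (show ty ≥ y0 from hy)]
    · right; rw [← veq, if_neg (show ¬ ty ≥ y0 by omega)]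
  simp only [tick_toward, tick_toward_alt]
  rw [heq, veq, heq2, veq2]
  rw [diag_eq x0 y0 h v _ (by positivity), PySem.List.pyGet?_neg_one_append_singleton]
  rcases le_or_gt ((tx - x0).natAbs : Int) ((ty - y0).natAbs : Int) with hle | hlt
  · -- |dx| ≤ |dy| : first branch fires
    rw [min_eq_left hle, max_eq_right hle]
    dsimp only
    rw [if_pos (show x0 + ((tx - x0).natAbs : Int) * h = tx by
      rw [mul_comm]; linarith [hh])]
    rw [tail_fold (fun q => (q.1, q.2 + v)) ((ty - (y0 + ((tx - x0).natAbs : Int) * v)).natAbs)]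
    have hn : (((ty - (y0 + ((tx - x0).natAbs : Int) * v)).natAbs : Int))
        = ((ty - y0).natAbs : Int) - ((tx - x0).natAbs : Int) := by
      rcases hv1 with rfl | rfl <;> omega
    rw [PySem.List.pyRange_one_append 0 (((tx - x0).natAbs : Int) + 1)
      (((ty - y0).natAbs : Int) + 1) (by positivity) (by omega),
      PySem.List.pyRange_one_succ_right (by positivity), List.map_append, List.map_append]
    congr 1
    congr 1
    · -- diagonal chunk
      refine List.map_congr_left fun i hi => ?_
      rw [PySem.List.mem_pyRange_one] at hi
      rw [min_eq_left (by omega), min_eq_left (by omega), mul_comm i h, mul_comm i v]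
    · -- the turning point
      simp only [List.map_cons, List.map_nil]
      rw [min_self, min_eq_left hle]
      simp [mul_comm]
    · -- vertical tail chunk
      rw [PySem.List.pyRange_one, List.map_map]
      have hn2 : ((((ty - y0).natAbs : Int) + 1 - (((tx - x0).natAbs : Int) + 1)).toNat)
          = (ty - (y0 + ((tx - x0).natAbs : Int) * v)).natAbs := by
        rcases hv1 with rfl | rfl <;> omega
      rw [hn2]
      refine List.map_congr_left fun k hk => ?_
      rw [List.mem_range] at hk
      rw [iter_v]
      simp only [Function.comp]
      rw [min_eq_right (by omega), min_eq_left (by omega)]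
      simp only [Prod.mk.injEq]
      refine ⟨by ring, by push_cast; ring⟩
  · -- |dy| < |dx| : elif branch fires
    rw [min_eq_right (le_of_lt hlt), max_eq_left (le_of_lt hlt)]
    have hne : ¬ (x0 + ((ty - y0).natAbs : Int) * h = tx) := by
      intro hcon
      have : h * ((ty - y0).natAbs : Int) = h * ((tx - x0).natAbs : Int) := by
        rw [hh]; rw [mul_comm] at hcon; omega
      have h0 : h ≠ 0 := by rcases hh1 with rfl | rfl <;> omega
      have := mul_left_cancel₀ h0 this
      omega
    dsimp only
    rw [if_neg hne]
    rw [if_pos (show y0 + ((ty - y0).natAbs : Int) * v = ty by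
      rw [mul_comm]; linarith [hv])]
    rw [tail_fold (fun q => (q.1 + h, q.2)) ((tx - (x0 + ((ty - y0).natAbs : Int) * h)).natAbs)]
    rw [PySem.List.pyRange_one_append 0 (((ty - y0).natAbs : Int) + 1)
      (((tx - x0).natAbs : Int) + 1) (by positivity) (by omega),
      PySem.List.pyRange_one_succ_right (by positivity), List.map_append, List.map_append]
    congr 1
    congr 1
    · refine List.map_congr_left fun i hi => ?_
      rw [PySem.List.mem_pyRange_one] at hi
      rw [min_eq_left (by omega), min_eq_left (by omega), mul_comm i h, mul_comm i v]
    · simp only [List.map_cons, List.map_nil]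
      rw [min_self, min_eq_left (le_of_lt hlt)]
      simp [mul_comm]
    · rw [PySem.List.pyRange_one, List.map_map]
      have hn2 : ((((tx - x0).natAbs : Int) + 1 - (((ty - y0).natAbs : Int) + 1)).toNat)
          = (tx - (x0 + ((ty - y0).natAbs : Int) * h)).natAbs := by
        rcases hh1 with rfl | rfl <;> omega
      rw [hn2]
      refine List.map_congr_left fun k hk => ?_
      rw [List.mem_range] at hk
      have hkk : ((k : Int)) < ((tx - (x0 + ((ty - y0).natAbs : Int) * h)).natAbs : Int) := by
        exact_mod_cast hk
      rw [iter_h]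
      simp only [Function.comp]
      have hb : ((tx - (x0 + ((ty - y0).natAbs : Int) * h)).natAbs : Int)
          = ((tx - x0).natAbs : Int) - ((ty - y0).natAbs : Int) := by
        rcases hh1 with rfl | rfl <;> omega
      rw [min_eq_left (by omega), min_eq_right (by omega)]
      simp only [Prod.mk.injEq]
      refine ⟨by push_cast; ring, by ring⟩

theorem tick_toward_spec : Claim_equal_tick_toward := by
  intro start target _
  unfold Spec_tick_toward
  obtain ⟨x0, y0⟩ := start
  obtain ⟨tx, ty⟩ := target
  rcases le_or_gt x0 tx with hx | hx <;> rcases le_or_gt y0 ty with hy | hy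
  · exact key x0 y0 tx ty 1 1
      (if_pos (show tx ≥ x0 from hx)) (if_pos (show ty ≥ y0 from hy))
      (if_pos (by omega)) (if_pos (by omega))
  · exact key x0 y0 tx ty 1 (-1)
      (if_pos (show tx ≥ x0 from hx)) (if_neg (show ¬ ty ≥ y0 by omega))
      (if_pos (by omega)) (if_neg (by omega))
  · exact key x0 y0 tx ty (-1) 1
      (if_neg (show ¬ tx ≥ x0 by omega)) (if_pos (show ty ≥ y0 from hy))
      (if_neg (by omega)) (if_pos (by omega))
  · exact key x0 y0 tx ty (-1) (-1)
      (if_neg (show ¬ tx ≥ x0 by omega)) (if_neg (show ¬ ty ≥ y0 by omega))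
      (if_neg (by omega)) (if_neg (by omega))
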